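-- pv_equiv track=rewrite | github.com/mirarifhasan/QASystem | q_a_system/api_sevice/mysql_operations.py | findIfAggregate
-- ===== SOURCE A (Python) =====
-- def findIfAggregate(question):
--     queryIDs = []
--     questionWords = question.split(' ')
--     questionWords[-1] = questionWords[-1].replace("?", "")
--
--     for word in questionWords:
--         if word in ['top', 'maximum']:
--             queryIDs = [22]
--         elif word in ['total']:
--             queryIDs = [23]
--         elif word in ['average']:
--             queryIDs = [24]
--
--     return queryIDs
-- ===== SOURCE B (Python) =====
-- def findIfAggregate(question):
--     words = question.split(' ')
--     words[-1] = words[-1].replace("?", "")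
--     for word in reversed(words):
--         if word in ('top', 'maximum'):
--             return [22]
--         if word == 'total':
--             return [23]
--         if word == 'average':
--             return [24]
--     return []
-- ===== Notes on version B (the rewrite author's own statement) =====
-- stated objective: alternative
-- what changed: B scans the words in reverse and returns immediately on the first aggregate keyword (the last forward match), instead of A's full forward pass that keeps overwriting the accumulator.
import Mathlib
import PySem

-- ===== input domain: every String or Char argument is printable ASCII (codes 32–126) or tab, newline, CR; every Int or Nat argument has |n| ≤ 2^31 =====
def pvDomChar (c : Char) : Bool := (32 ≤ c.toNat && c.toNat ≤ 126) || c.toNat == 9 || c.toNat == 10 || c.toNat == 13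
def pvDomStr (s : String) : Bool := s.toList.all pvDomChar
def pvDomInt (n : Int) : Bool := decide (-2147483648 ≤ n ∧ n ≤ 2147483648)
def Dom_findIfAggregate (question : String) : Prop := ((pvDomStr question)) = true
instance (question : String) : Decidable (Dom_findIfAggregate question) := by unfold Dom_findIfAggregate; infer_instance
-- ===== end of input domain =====

-- B replaces A's full forward overwriting scan by a reverse scan with early return (alternative decomposition, same cost).

-- ===== PORT A =====
-- split? with the nonempty separator " " is always some (comment: getD [] is unreachable)
-- questionWords[-1] = questionWords[-1].replace("?", "")  (split(' ') output is always nonempty)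
def pvFixLast : List String → List String
  | [] => []
  | [w] => [PySem.Str.replace w "?" ""]
  | w :: rest => w :: pvFixLast rest

def findIfAggregate (question : String) : List Int :=
  let questionWords := pvFixLast (((PySem.Str.split? question " ").getD []))
  questionWords.foldl
    (fun queryIDs word =>
      if word = "top" ∨ word = "maximum" then [22]
      else if word = "total" then [23]
      else if word = "average" then [24]
      else queryIDs) []

-- ===== PORT B =====
-- reverse scan, first match wins (early return)
def pvRevScan : List String → List Int
  | [] => []
  | word :: rest =>
      if word = "top" ∨ word = "maximum" then [22]
      else if word = "total" then [23]
      else if word = "average" then [24]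
      else pvRevScan rest

def findIfAggregate_alt (question : String) : List Int :=
  let words := pvFixLast (((PySem.Str.split? question " ").getD []))
  pvRevScan words.reverse

-- ===== PRECONDITION & SPEC =====
def Spec_findIfAggregate (question : String) (out : List Int) : Prop := out = findIfAggregate_alt question
instance (question : String) (out : List Int) : Decidable (Spec_findIfAggregate question out) := by unfold Spec_findIfAggregate; infer_instance

-- ===== CLAIM (what is proved, stated in full; the proofs are below) =====
def Claim_equal_findIfAggregate : Prop := ∀ (question : String), Dom_findIfAggregate question → Spec_findIfAggregate question (findIfAggregate question)

-- ===== LEMMAS AND PROOFS =====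
def pvClassify (word : String) : Option (List Int) :=
  if word = "top" ∨ word = "maximum" then some [22]
  else if word = "total" then some [23]
  else if word = "average" then some [24]
  else none

theorem pvRevScan_eq (ws : List String) :
    pvRevScan ws = (ws.findSome? pvClassify).getD [] := by
  induction ws with
  | nil => simp [pvRevScan]
  | cons w rest ih =>
      simp only [pvRevScan, List.findSome?_cons, pvClassify]
      split_ifs <;> simp [ih]

theorem pvFoldl_eq (ws : List String) (acc : List Int) :
    ws.foldl
      (fun queryIDs word =>
        if word = "top" ∨ word = "maximum" then [22]
        else if word = "total" then [23]
        else if word = "average" then [24]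
        else queryIDs) acc
    = (ws.reverse.findSome? pvClassify).getD acc := by
  induction ws generalizing acc with
  | nil => simp
  | cons w rest ih =>
      simp only [List.foldl_cons, ih, List.reverse_cons, List.findSome?_append]
      cases h : rest.reverse.findSome? pvClassify with
      | some v => simp
      | none => simp [pvClassify]; split_ifs <;> simp

-- ===== VERDICT (by name: the statement is the Claim_ definition above) =====
theorem findIfAggregate_spec : Claim_equal_findIfAggregate := by
  intro question _
  unfold Spec_findIfAggregate findIfAggregate findIfAggregate_alt
  rw [pvFoldl_eq, pvRevScan_eq]
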